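-- pv_equiv track=rewrite | github.com/ChiderovaUmutay/tic-tac-mini-game | win_combination_class.py | create_new_diagonals_combinations
-- ===== SOURCE A (Python) =====
-- def create_new_diagonals_combinations(up_num: int, low_num: int, coords_data: list, combinations_qty: int) -> list:
--     upper_coords = [coords_data]
--     lower_coords = [coords_data]
--     for index in range(combinations_qty):
--         up = [[data[0] + up_num, data[1]] for data in upper_coords[index][:-1]]
--         low = [[data[0], data[1] + low_num] for data in lower_coords[index][:-1]]
--         upper_coords.append(up)
--         lower_coords.append(low)
--     new_coords = upper_coords[1:] + lower_coords[1:]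
--     return new_coords
-- ===== SOURCE B (Python) =====
-- def create_new_diagonals_combinations(up_num: int, low_num: int, coords_data: list, combinations_qty: int) -> list:
--     # Closed form: combination k is coords_data's first max(0, n-k) rows, shifted by k steps,
--     # computed directly from coords_data instead of chaining from the previous combination.
--     n = len(coords_data)
--     upper = [[[coords_data[j][0] + k * up_num, coords_data[j][1]] for j in range(max(0, n - k))]
--              for k in range(1, combinations_qty + 1)]
--     lower = [[[coords_data[j][0], coords_data[j][1] + k * low_num] for j in range(max(0, n - k))]
--              for k in range(1, combinations_qty + 1)]
--     return upper + lower
-- ===== Notes on version B (the rewrite author's own statement) =====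
-- stated objective: simpler
-- what changed: Replaces the iterative chaining (each combination built from the previous one, stored in growing accumulator lists and re-indexed) by a closed form: combination k is computed directly from coords_data as its first max(0, n-k) rows shifted by k steps.
import Mathlib
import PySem

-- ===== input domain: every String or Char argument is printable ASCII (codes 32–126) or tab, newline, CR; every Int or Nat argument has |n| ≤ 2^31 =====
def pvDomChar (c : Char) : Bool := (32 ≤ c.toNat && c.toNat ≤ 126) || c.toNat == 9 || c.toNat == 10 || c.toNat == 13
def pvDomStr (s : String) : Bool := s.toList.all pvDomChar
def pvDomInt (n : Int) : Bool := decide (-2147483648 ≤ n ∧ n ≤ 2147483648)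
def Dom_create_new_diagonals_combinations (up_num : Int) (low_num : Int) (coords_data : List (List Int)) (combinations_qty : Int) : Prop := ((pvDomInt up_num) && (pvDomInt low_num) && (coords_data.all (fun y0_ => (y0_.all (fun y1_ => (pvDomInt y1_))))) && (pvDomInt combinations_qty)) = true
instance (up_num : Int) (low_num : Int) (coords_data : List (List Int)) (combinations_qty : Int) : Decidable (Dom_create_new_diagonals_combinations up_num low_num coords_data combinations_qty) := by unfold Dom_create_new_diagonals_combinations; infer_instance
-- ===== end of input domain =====

-- B computes each shifted combination directly from coords_data by a closed form instead of
-- chaining each combination from the previous one (objective: simpler decomposition).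

-- ===== PORT A =====
-- data[0]/data[1] are ported as pyGetD with default 0: Pre_ excludes exactly the inputs where
-- Python's data[0]/data[1] raises IndexError. '[:-1]' is List.dropLast and 'xs[1:]' is
-- List.drop 1 (both exact for every list); upper_coords[index] is pyGetD (index is always in
-- range here, the accumulator has index+1 elements).
def create_new_diagonals_combinations (up_num : Int) (low_num : Int) (coords_data : List (List Int)) (combinations_qty : Int) : List (List (List Int)) :=
  let init : List (List (List Int)) × List (List (List Int)) := ([coords_data], [coords_data])
  let st := (PySem.List.pyRange 0 combinations_qty 1).foldl
    (fun st index =>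
      let up := (PySem.List.pyGetD st.1 index []).dropLast.map
        (fun data => [PySem.List.pyGetD data 0 0 + up_num, PySem.List.pyGetD data 1 0])
      let low := (PySem.List.pyGetD st.2 index []).dropLast.map
        (fun data => [PySem.List.pyGetD data 0 0, PySem.List.pyGetD data 1 0 + low_num])
      (st.1 ++ [up], st.2 ++ [low])) init
  st.1.drop 1 ++ st.2.drop 1

-- ===== PORT B =====
def create_new_diagonals_combinations_alt (up_num : Int) (low_num : Int) (coords_data : List (List Int)) (combinations_qty : Int) : List (List (List Int)) :=
  let n : Int := PySem.List.len coords_data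
  let upper := (PySem.List.pyRange 1 (combinations_qty + 1) 1).map (fun k =>
    (PySem.List.pyRange 0 (max 0 (n - k)) 1).map (fun j =>
      [PySem.List.pyGetD (PySem.List.pyGetD coords_data j []) 0 0 + k * up_num,
       PySem.List.pyGetD (PySem.List.pyGetD coords_data j []) 1 0]))
  let lower := (PySem.List.pyRange 1 (combinations_qty + 1) 1).map (fun k =>
    (PySem.List.pyRange 0 (max 0 (n - k)) 1).map (fun j =>
      [PySem.List.pyGetD (PySem.List.pyGetD coords_data j []) 0 0,
       PySem.List.pyGetD (PySem.List.pyGetD coords_data j []) 1 0 + k * low_num]))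
  upper ++ lower

-- ===== PRECONDITION & SPEC =====
-- Pre_ excludes exactly the inputs on which Python A raises IndexError: combinations_qty >= 1
-- with some row of coords_data[:-1] shorter than 2 elements (B raises IndexError there too).
def Pre_create_new_diagonals_combinations (up_num : Int) (low_num : Int) (coords_data : List (List Int)) (combinations_qty : Int) : Prop :=
  combinations_qty ≤ 0 ∨ ∀ l ∈ coords_data.dropLast, 2 ≤ l.length
instance (up_num : Int) (low_num : Int) (coords_data : List (List Int)) (combinations_qty : Int) : Decidable (Pre_create_new_diagonals_combinations up_num low_num coords_data combinations_qty) := by unfold Pre_create_new_diagonals_combinations; infer_instance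
def pvWitness_create_new_diagonals_combinations : Int × Int × List (List Int) × Int := (1, -1, [[0, 0], [1, 1], [2, 2]], 2)

def Spec_create_new_diagonals_combinations (up_num : Int) (low_num : Int) (coords_data : List (List Int)) (combinations_qty : Int) (out : List (List (List Int))) : Prop := out = create_new_diagonals_combinations_alt up_num low_num coords_data combinations_qty
instance (up_num : Int) (low_num : Int) (coords_data : List (List Int)) (combinations_qty : Int) (out : List (List (List Int))) : Decidable (Spec_create_new_diagonals_combinations up_num low_num coords_data combinations_qty out) := by unfold Spec_create_new_diagonals_combinations; infer_instance

-- ===== CLAIM (what is proved, stated in full; the proofs are below) =====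
def Claim_equal_create_new_diagonals_combinations : Prop := ∀ (up_num : Int) (low_num : Int) (coords_data : List (List Int)) (combinations_qty : Int), Dom_create_new_diagonals_combinations up_num low_num coords_data combinations_qty → Pre_create_new_diagonals_combinations up_num low_num coords_data combinations_qty → Spec_create_new_diagonals_combinations up_num low_num coords_data combinations_qty (create_new_diagonals_combinations up_num low_num coords_data combinations_qty)

-- ===== LEMMAS AND PROOFS =====
-- The two ports are in fact equal on all inputs of the stated types (the getD 0 defaults in
-- both ports propagate identically); the proof below does not need Pre_, which only serves to
-- keep the differential test away from the inputs where both Pythons raise.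

-- closed-form row/combination k (du shifts the first coordinate, dl the second)
def pvRow (du dl : Int) (cs : List (List Int)) (k : Nat) (j : Nat) : List Int :=
  [PySem.List.pyGetD (PySem.List.pyGetD cs (j : Int) []) 0 0 + (k : Int) * du,
   PySem.List.pyGetD (PySem.List.pyGetD cs (j : Int) []) 1 0 + (k : Int) * dl]

def pvComb (du dl : Int) (cs : List (List Int)) (k : Nat) : List (List Int) :=
  (List.range (cs.length - k)).map (pvRow du dl cs k)

-- one iteration of A's loop body (on one of the two accumulators)
def pvStep (du dl : Int) (l : List (List Int)) : List (List Int) :=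
  l.dropLast.map (fun data => [PySem.List.pyGetD data 0 0 + du, PySem.List.pyGetD data 1 0 + dl])

lemma pvStep_zero (du dl : Int) (cs : List (List Int)) :
    pvStep du dl cs = pvComb du dl cs 1 := by
  unfold pvStep pvComb
  apply List.ext_getElem
  · simp
  · intro j h1 h2
    simp only [List.getElem_map, List.getElem_range, List.getElem_dropLast]
    have hj : j < cs.length := by simp at h1; omega
    simp [pvRow, PySem.List.pyGetD_natCast, List.getElem?_eq_getElem hj]

lemma pvStep_succ (du dl : Int) (cs : List (List Int)) (k : Nat) :
    pvStep du dl (pvComb du dl cs k) = pvComb du dl cs (k + 1) := by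
  unfold pvStep pvComb
  apply List.ext_getElem
  · simp; omega
  · intro j h1 h2
    simp only [List.getElem_map, List.getElem_range, List.getElem_dropLast]
    simp [pvRow, PySem.List.pyGetD]
    constructor <;> push_cast <;> ring

-- invariant of A's loop: after m iterations the accumulators hold coords_data followed by the
-- closed-form combinations 1..m
lemma pvLoop (up low : Int) (cs : List (List Int)) (m : Nat) :
    (PySem.List.pyRange 0 (m : Int) 1).foldl
      (fun (st : List (List (List Int)) × List (List (List Int))) index =>
        let u := (PySem.List.pyGetD st.1 index []).dropLast.map
          (fun data => [PySem.List.pyGetD data 0 0 + up, PySem.List.pyGetD data 1 0])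
        let l := (PySem.List.pyGetD st.2 index []).dropLast.map
          (fun data => [PySem.List.pyGetD data 0 0, PySem.List.pyGetD data 1 0 + low])
        (st.1 ++ [u], st.2 ++ [l])) ([cs], [cs])
    = (cs :: (List.range m).map (fun i => pvComb up 0 cs (i + 1)),
       cs :: (List.range m).map (fun i => pvComb 0 low cs (i + 1))) := by
  induction m with
  | zero => simp [PySem.List.pyRange_one_eq_nil]
  | succ r ih =>
    have hsplit : PySem.List.pyRange 0 ((r + 1 : Nat) : Int) 1
        = PySem.List.pyRange 0 (r : Nat) 1 ++ [(r : Int)] := by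
      push_cast
      exact PySem.List.pyRange_one_succ_right (by positivity)
    rw [hsplit, List.foldl_append, ih]
    simp only [List.foldl_cons, List.foldl_nil]
    have hu : ∀ (l : List (List Int)), l.dropLast.map
        (fun data => [PySem.List.pyGetD data 0 0 + up, PySem.List.pyGetD data 1 0])
        = pvStep up 0 l := by intro l; simp [pvStep]
    have hl : ∀ (l : List (List Int)), l.dropLast.map
        (fun data => [PySem.List.pyGetD data 0 0, PySem.List.pyGetD data 1 0 + low])
        = pvStep 0 low l := by intro l; simp [pvStep]
    have hget : ∀ (f : Nat → List (List Int)),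
        PySem.List.pyGetD (cs :: (List.range r).map f) (r : Int) []
        = if h : r = 0 then cs else f (r - 1) := by
      intro f
      rcases Nat.eq_zero_or_pos r with h | h
      · subst h; simp
      · obtain ⟨s, rfl⟩ : ∃ s, r = s + 1 := ⟨r - 1, by omega⟩
        rw [dif_neg (Nat.succ_ne_zero s), PySem.List.pyGetD_natCast]
        simp [List.getD_cons_succ, List.getD_eq_getElem?_getD, List.getElem?_map,
              List.getElem?_range, Nat.lt_succ_self]
    simp only [hu, hl, hget]
    rcases Nat.eq_zero_or_pos r with h | h
    · subst h
      simp [pvStep_zero, List.range_succ]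
    · simp only [dif_neg (by omega : ¬ r = 0)]
      have : r - 1 + 1 = r := by omega
      rw [this, pvStep_succ, pvStep_succ]
      simp [List.range_succ]

-- B's per-family map equals the same closed-form combinations 1..m
lemma pvAlt (du dl : Int) (cs : List (List Int)) (m : Nat) :
    (PySem.List.pyRange 1 ((m : Int) + 1) 1).map (fun k =>
      (PySem.List.pyRange 0 (max 0 (PySem.List.len cs - k)) 1).map (fun j =>
        [PySem.List.pyGetD (PySem.List.pyGetD cs j []) 0 0 + k * du,
         PySem.List.pyGetD (PySem.List.pyGetD cs j []) 1 0 + k * dl]))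
    = (List.range m).map (fun i => pvComb du dl cs (i + 1)) := by
  have houter : PySem.List.pyRange 1 ((m : Int) + 1) 1
      = (List.range m).map (fun (k : Nat) => 1 + (k : Int)) := by
    rw [PySem.List.pyRange_one]
    have : ((m : Int) + 1 - 1).toNat = m := by omega
    rw [this]
  rw [houter, List.map_map]
  apply List.ext_getElem
  · simp
  · intro i h1 h2
    simp only [List.getElem_map, List.getElem_range, Function.comp_apply]
    have hmax : max 0 (PySem.List.len cs - (1 + (i : Int)))
        = ((cs.length - (i + 1) : Nat) : Int) := by
      simp [PySem.List.len_eq]; omega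
    rw [hmax, PySem.List.pyRange_zero_natCast]
    unfold pvComb
    rw [List.map_map]
    apply List.ext_getElem
    · simp
    · intro j j1 j2
      simp only [List.getElem_map, List.getElem_range, Function.comp_apply]
      unfold pvRow
      push_cast
      ring_nf

-- ===== VERDICT (by name: the statement is the Claim_ definition above) =====
theorem create_new_diagonals_combinations_spec : Claim_equal_create_new_diagonals_combinations := by
  intro up_num low_num coords_data combinations_qty _hdom _hpre
  unfold Spec_create_new_diagonals_combinations
  unfold create_new_diagonals_combinations create_new_diagonals_combinations_alt
  dsimp only
  rcases le_or_gt combinations_qty 0 with hq | hq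
  · rw [PySem.List.pyRange_one_eq_nil hq, PySem.List.pyRange_one_eq_nil (by omega)]
    simp
  · obtain ⟨m, rfl⟩ : ∃ m : Nat, combinations_qty = (m : Int) :=
      ⟨combinations_qty.toNat, (Int.toNat_of_nonneg hq.le).symm⟩
    rw [pvLoop up_num low_num coords_data m]
    have hBu := pvAlt up_num 0 coords_data m
    have hBl := pvAlt 0 low_num coords_data m
    simp only [mul_zero, add_zero] at hBu hBl
    rw [hBu, hBl]
    simp
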